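-- pv_equiv track=rewrite | github.com/binhtranthanh-itr/Anomaly-Detection | test_ae_tflite.py | cal_num_process_and_num_shard
-- ===== SOURCE A (Python) =====
-- def cal_num_process_and_num_shard(files, org_num_processes, org_num_shards):
--     num_processes, num_shards = 0, 0
--     if len(files) >= org_num_shards:
--         num_processes = org_num_processes
--         num_shards = org_num_shards
--     else:
--         for n_threads in reversed(range(org_num_processes)):
--             if len(files) // n_threads >= 1:
--                 num_processes = n_threads
--                 num_shards = (len(files) // n_threads) * n_threads
--                 break
--
--     return num_processes, num_shards
-- ===== SOURCE B (Python) =====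
-- def cal_num_process_and_num_shard(files, org_num_processes, org_num_shards):
--     if len(files) >= org_num_shards:
--         return org_num_processes, org_num_shards
--     if org_num_processes < 1:
--         return 0, 0
--     n = min(len(files), org_num_processes - 1)
--     return n, (len(files) // n) * n
-- ===== Notes on version B (the rewrite author's own statement) =====
-- stated objective: simpler
-- what changed: Replaces the reversed scan over range(org_num_processes) with the closed form n = min(len(files), org_num_processes - 1), since the first n_threads with len(files)//n_threads >= 1 is exactly that minimum.
import Mathlib
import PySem

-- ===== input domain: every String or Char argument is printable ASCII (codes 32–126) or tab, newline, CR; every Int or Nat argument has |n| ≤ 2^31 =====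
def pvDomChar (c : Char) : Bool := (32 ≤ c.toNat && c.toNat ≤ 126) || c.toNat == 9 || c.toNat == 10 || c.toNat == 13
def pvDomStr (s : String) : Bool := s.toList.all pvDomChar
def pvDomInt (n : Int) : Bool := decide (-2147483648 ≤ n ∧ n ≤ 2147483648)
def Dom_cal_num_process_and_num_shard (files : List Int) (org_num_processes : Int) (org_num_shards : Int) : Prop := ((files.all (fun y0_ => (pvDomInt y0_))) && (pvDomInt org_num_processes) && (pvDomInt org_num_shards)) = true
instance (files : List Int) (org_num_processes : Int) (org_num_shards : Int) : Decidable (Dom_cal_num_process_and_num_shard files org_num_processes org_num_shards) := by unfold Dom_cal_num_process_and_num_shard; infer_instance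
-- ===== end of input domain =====

-- ===== PORT A =====
-- B replaces A's reversed scan over range(org_num_processes) with the closed form
-- min(len(files), org_num_processes-1); objective: simpler.

-- the for-loop with break: first n in the list with len(files)//n >= 1 wins
def calLoopA (lenf : Int) (acc : Int × Int) : List Int → Int × Int
  | [] => acc
  | n :: rest =>
      if 1 ≤ PySem.Int.floordiv lenf n then (n, PySem.Int.floordiv lenf n * n)
      else calLoopA lenf acc rest

def cal_num_process_and_num_shard (files : List Int) (org_num_processes : Int) (org_num_shards : Int) : Int × Int :=
  if (PySem.List.len files) ≥ org_num_shards then (org_num_processes, org_num_shards)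
  else
    -- reversed(range(org_num_processes)) = range(org_num_processes-1, -1, -1)
    calLoopA (PySem.List.len files) (0, 0)
      (PySem.List.pyRange (org_num_processes - 1) (-1) (-1))

-- ===== PORT B =====
def cal_num_process_and_num_shard_alt (files : List Int) (org_num_processes : Int) (org_num_shards : Int) : Int × Int :=
  if (PySem.List.len files) ≥ org_num_shards then (org_num_processes, org_num_shards)
  else if org_num_processes < 1 then (0, 0)
  else
    let n := min (PySem.List.len files) (org_num_processes - 1)
    (n, PySem.Int.floordiv (PySem.List.len files) n * n)

-- ===== PRECONDITION & SPEC =====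
-- Pre_ excludes exactly the inputs where Python A raises ZeroDivisionError: the loop reaching
-- n_threads == 0, i.e. len(files) < org_num_shards with org_num_processes >= 1 and
-- (files empty or org_num_processes == 1).  B raises there as well.
def Pre_cal_num_process_and_num_shard (files : List Int) (org_num_processes : Int) (org_num_shards : Int) : Prop :=
  (files.length : Int) ≥ org_num_shards ∨ org_num_processes ≤ 0 ∨
    (2 ≤ org_num_processes ∧ files ≠ [])
instance (files : List Int) (org_num_processes : Int) (org_num_shards : Int) : Decidable (Pre_cal_num_process_and_num_shard files org_num_processes org_num_shards) := by unfold Pre_cal_num_process_and_num_shard; infer_instance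

def pvWitness_cal_num_process_and_num_shard : List Int × Int × Int := ([7], 2, 5)

def Spec_cal_num_process_and_num_shard (files : List Int) (org_num_processes : Int) (org_num_shards : Int) (out : Int × Int) : Prop := out = cal_num_process_and_num_shard_alt files org_num_processes org_num_shards
instance (files : List Int) (org_num_processes : Int) (org_num_shards : Int) (out : Int × Int) : Decidable (Spec_cal_num_process_and_num_shard files org_num_processes org_num_shards out) := by unfold Spec_cal_num_process_and_num_shard; infer_instance

-- ===== CLAIM (what is proved, stated in full; the proofs are below) =====
def Claim_equal_cal_num_process_and_num_shard : Prop := ∀ (files : List Int) (org_num_processes : Int) (org_num_shards : Int), Dom_cal_num_process_and_num_shard files org_num_processes org_num_shards → Pre_cal_num_process_and_num_shard files org_num_processes org_num_shards → Spec_cal_num_process_and_num_shard files org_num_processes org_num_shards (cal_num_process_and_num_shard files org_num_processes org_num_shards)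

-- ===== LEMMAS AND PROOFS =====

-- the loop over [k, k-1, ..., 0] with 1 ≤ lenf stops exactly at min lenf k
lemma calLoopA_min (lenf : Int) (hl : 1 ≤ lenf) :
    ∀ (k : Nat), 1 ≤ (k : Int) →
      calLoopA lenf (0, 0) (PySem.List.pyRange (k : Int) (-1) (-1)) =
        (min lenf (k : Int), PySem.Int.floordiv lenf (min lenf (k : Int)) * min lenf (k : Int)) := by
  intro k
  induction k with
  | zero => intro h; omega
  | succ m ih =>
    intro _
    rw [PySem.List.pyRange_neg_one_cons (by push_cast; omega)]
    have hkpos : (0 : Int) < ((m + 1 : Nat) : Int) := by push_cast; omega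
    by_cases hc : ((m + 1 : Nat) : Int) ≤ lenf
    · have h1 : 1 ≤ PySem.Int.floordiv lenf ((m + 1 : Nat) : Int) := by
        rw [PySem.Int.le_floordiv_iff_mul_le (hb := hkpos)]; omega
      have hmin : min lenf ((m + 1 : Nat) : Int) = ((m + 1 : Nat) : Int) := by omega
      rw [hmin]; simp only [calLoopA, if_pos h1]
    · have h1 : ¬ 1 ≤ PySem.Int.floordiv lenf ((m + 1 : Nat) : Int) := by
        rw [PySem.Int.le_floordiv_iff_mul_le (hb := hkpos)]; omega
      have hm1 : 1 ≤ (m : Int) := by push_cast at hc ⊢; omega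
      have hcast : ((m + 1 : Nat) : Int) - 1 = (m : Int) := by push_cast; ring
      have hmin : min lenf ((m + 1 : Nat) : Int) = min lenf (m : Int) := by
        push_cast at hc ⊢; omega
      simp only [calLoopA, if_neg h1, hcast, hmin]
      exact ih hm1

-- ===== VERDICT (by name: the statement is the Claim_ definition above) =====
theorem cal_num_process_and_num_shard_spec : Claim_equal_cal_num_process_and_num_shard := by
  intro files p s _ hpre
  unfold Spec_cal_num_process_and_num_shard cal_num_process_and_num_shard cal_num_process_and_num_shard_alt
  simp only [PySem.List.len_eq]
  by_cases h1 : (files.length : Int) ≥ s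
  · simp [h1]
  · have hp : p ≤ 0 ∨ (2 ≤ p ∧ files ≠ []) := by
      rcases hpre with h | h | h
      · exact absurd h h1
      · exact Or.inl h
      · exact Or.inr h
    rcases hp with hp | ⟨hp2, hne⟩
    · rw [if_neg h1, if_pos (by omega : p < 1),
        PySem.List.pyRange_neg_one_eq_nil (by omega : p - 1 ≤ -1), if_neg h1]
      rfl
    · have hl : 1 ≤ (files.length : Int) := by
        cases files with
        | nil => exact absurd rfl hne
        | cons a t => simp
      have hk : ((p - 1).toNat : Int) = p - 1 := by omega
      rw [if_neg h1, if_neg (by omega : ¬ p < 1), ← hk,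
        calLoopA_min (files.length : Int) hl (p - 1).toNat (by omega)]
      rw [if_neg h1]
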